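-- pv_equiv track=rewrite | github.com/geekdifferent/torrent_web_scraper | web_scraper_04.py | get_wr_id
-- ===== SOURCE A (Python) =====
-- def get_wr_id(url):
--
--     tmp = url.rfind('/')
--     if (tmp < 0): # 둘다 검색 못하면 포기
--         return 0
--     else:
--         checkStr = '/'
--
--         startp = tmp+len(checkStr)
--         endp = startp
--
--         for endp in range(startp,len(url)):
--             if (url[endp]).isdigit():
--                 continue
--             else:
--                 endp = endp-1
--                 break
--
--         endp = endp+1
--     return int((url[startp:endp]))
-- ===== SOURCE B (Python) =====
-- def get_wr_id(url):
--     # Single forward pass: track the leading digit run after the most recent '/'.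
--     found = False      # have we seen any '/' ?
--     run = ''           # leading digit run after the most recent '/'
--     open_run = False   # is that run still extendable?
--     for ch in url:
--         if ch == '/':
--             found = True
--             run = ''
--             open_run = True
--         elif open_run:
--             if ch.isdigit():
--                 run += ch
--             else:
--                 open_run = False
--     if not found:
--         return 0
--     return int(run)
-- ===== Notes on version B (the rewrite author's own statement) =====
-- stated objective: alternative
-- what changed: A finds the last '/' with rfind, then walks indices with explicit start/end bookkeeping and parses a slice with int(); B is a single forward character pass maintaining the leading digit run after the most recent slash, with no rfind, no index arithmetic and no slicing.
import Mathlib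
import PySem

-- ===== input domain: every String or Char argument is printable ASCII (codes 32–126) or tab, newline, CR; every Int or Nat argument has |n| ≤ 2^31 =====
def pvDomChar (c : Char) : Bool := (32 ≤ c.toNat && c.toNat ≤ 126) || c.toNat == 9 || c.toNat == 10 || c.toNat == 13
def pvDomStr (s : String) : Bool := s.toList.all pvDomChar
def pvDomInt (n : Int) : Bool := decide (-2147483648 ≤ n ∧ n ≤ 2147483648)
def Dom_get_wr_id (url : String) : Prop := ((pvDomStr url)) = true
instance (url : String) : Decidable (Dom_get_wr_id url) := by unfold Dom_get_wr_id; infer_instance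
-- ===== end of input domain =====

-- B replaces A's rfind + index bookkeeping + slice-and-int with one forward pass keeping the digit run
-- after the most recent '/' (objective: alternative; return values proved equal on Pre_).

-- ===== PORT A =====
-- A's 'for endp in range(startp, len(url)): if url[endp].isdigit(): continue else: endp = endp-1; break'
-- (indices drawn from the range are always in bounds, so the .getD ' ' default is never used)
def pvALoop (cs : List Char) (idxs : List Int) (endp : Int) : Int :=
  match idxs with
  | [] => endp
  | i :: rest =>
      if PySem.Chars.isdigit ((PySem.List.pyGet? cs i).getD ' ') then pvALoop cs rest i
      else i - 1

def get_wr_id (url : String) : Int :=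
  let tmp : Int := PySem.Str.rfind url "/"
  if tmp < 0 then 0
  else
    let checkStr : String := "/"
    let startp : Int := tmp + PySem.Str.len checkStr
    let endp : Int := pvALoop url.toList (PySem.List.pyRange startp (PySem.Str.len url) 1) startp
    let endp2 : Int := endp + 1
    -- int(url[startp:endp]); none = ValueError (int of an empty slice), excluded by Pre_
    (PySem.Int.ofChars? (PySem.Chars.slice url.toList (some startp) (some endp2))).getD 0

-- ===== PORT B =====
-- state: (found a '/', leading digit run after the most recent '/', run still extendable)
def pvBStep (st : Bool × List Char × Bool) (ch : Char) : Bool × List Char × Bool :=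
  if ch = '/' then (true, [], true)
  else if st.2.2 then
    (if PySem.Chars.isdigit ch then (st.1, st.2.1 ++ [ch], true) else (st.1, st.2.1, false))
  else st

def get_wr_id_alt (url : String) : Int :=
  let r := url.toList.foldl pvBStep (false, [], false)
  if !r.1 then 0
  -- int(run); none = ValueError (int of an empty run), excluded by Pre_
  else (PySem.Int.ofChars? r.2.1).getD 0

-- ===== PRECONDITION & SPEC =====
-- Pre_ excludes exactly the inputs on which the Python A raises ValueError: a slash is present
-- but the character right after the LAST '/' is missing or not a digit.  (B raises there too.)
def Pre_get_wr_id (url : String) : Prop :=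
  '/' ∈ url.toList →
    (url.toList.reverse.takeWhile (fun c => c ≠ '/')).getLast?.map PySem.Chars.isdigit = some true

instance (url : String) : Decidable (Pre_get_wr_id url) := by unfold Pre_get_wr_id; infer_instance

def pvWitness_get_wr_id : String := "a/12b"

def Spec_get_wr_id (url : String) (out : Int) : Prop := out = get_wr_id_alt url
instance (url : String) (out : Int) : Decidable (Spec_get_wr_id url out) := by unfold Spec_get_wr_id; infer_instance

-- ===== CLAIM (what is proved, stated in full; the proofs are below) =====
def Claim_equal_get_wr_id : Prop := ∀ (url : String), Dom_get_wr_id url → Pre_get_wr_id url → Spec_get_wr_id url (get_wr_id url)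

-- ===== LEMMAS AND PROOFS =====

-- simulation of A's index loop directly on the character suffix cs.drop i
def pvASim (i : Nat) (u : List Char) (e : Int) : Int :=
  match u with
  | [] => e
  | c :: u' => if PySem.Chars.isdigit c then pvASim (i+1) u' (i : Int) else (i : Int) - 1

lemma prefix_slash (s : List Char) (j : Nat) :
    ((['/'] : List Char).isPrefixOf (s.drop j) = true) ↔ s[j]? = some '/' := by
  rw [List.isPrefixOf_iff_prefix]
  have h : s[j]? = (s.drop j)[0]? := by simp [List.getElem?_drop]
  cases hd : s.drop j with
  | nil => rw [h, hd]; simp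
  | cons c rest => rw [h, hd]; simp [List.cons_prefix_iff]

lemma go_of_not_mem (s : List Char) (k : Nat) (h : ∀ j : Nat, s[j]? ≠ some '/') :
    PySem.Chars.rfind.go s ['/'] k = -1 := by
  induction k with
  | zero =>
      rw [PySem.Chars.rfind.go.eq_def]
      have h0 : ¬ ((['/'] : List Char).isPrefixOf s = true) := by
        have := (prefix_slash s 0).not.mpr (h 0)
        simpa using this
      simp [h0]
  | succ j ih =>
      rw [PySem.Chars.rfind.go.eq_def]
      have : ¬ ((['/'] : List Char).isPrefixOf (s.drop (j+1)) = true) :=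
        (prefix_slash s (j+1)).not.mpr (h (j+1))
      simp [this, ih]

lemma go_of_last (s : List Char) (k : Nat) (hk : s[k]? = some '/')
    (hlast : ∀ j : Nat, k < j → s[j]? ≠ some '/') :
    ∀ m : Nat, k ≤ m → PySem.Chars.rfind.go s ['/'] m = k := by
  intro m
  induction m with
  | zero =>
      intro hm
      have hk0 : k = 0 := Nat.le_zero.mp hm
      subst hk0
      rw [PySem.Chars.rfind.go.eq_def]
      have : (['/'] : List Char).isPrefixOf s = true := by
        have := (prefix_slash s 0).mpr hk
        simpa using this
      simp [this]
  | succ j ih =>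
      intro hm
      rw [PySem.Chars.rfind.go.eq_def]
      by_cases hkj : k = j + 1
      · subst hkj
        have : (['/'] : List Char).isPrefixOf (s.drop (j+1)) = true := (prefix_slash s (j+1)).mpr hk
        simp [this]
      · have hklt : k ≤ j := by omega
        have : ¬ ((['/'] : List Char).isPrefixOf (s.drop (j+1)) = true) :=
          (prefix_slash s (j+1)).not.mpr (hlast (j+1) (by omega))
        simp [this, ih hklt]

lemma rfind_of_not_mem (s : List Char) (h : '/' ∉ s) : PySem.Chars.rfind s ['/'] = -1 := by
  apply go_of_not_mem
  intro j hj
  exact h (List.mem_of_getElem? hj)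

lemma rfind_decomp (p t : List Char) (ht : '/' ∉ t) :
    PySem.Chars.rfind (p ++ '/' :: t) ['/'] = (p.length : Int) := by
  have hk : (p ++ '/' :: t)[p.length]? = some '/' := by
    simp
  have hlast : ∀ j : Nat, p.length < j → (p ++ '/' :: t)[j]? ≠ some '/' := by
    intro j hj hcon
    have hjlen : j < (p ++ '/' :: t).length := (List.getElem?_eq_some_iff.mp hcon).1
    have : (p ++ '/' :: t)[j]? = ('/' :: t)[j - p.length]? := by
      rw [List.getElem?_append_right (by omega)]
    rw [this] at hcon
    have hpos : 0 < j - p.length := by omega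
    have : ('/' :: t)[j - p.length]? = t[j - p.length - 1]? := by
      cases hd : j - p.length with
      | zero => omega
      | succ m => simp
    rw [this] at hcon
    exact ht (List.mem_of_getElem? hcon)
  exact go_of_last (p ++ '/' :: t) p.length hk hlast _ (by simp)

lemma pvALoop_eq_sim :
    ∀ (u : List Char) (cs : List Char) (i : Nat) (e : Int), cs.drop i = u →
      pvALoop cs (PySem.List.pyRange (i : Int) (cs.length : Int) 1) e = pvASim i u e := by
  intro u
  induction u with
  | nil =>
      intro cs i e hd
      have hle : cs.length ≤ i := by
        simpa [List.drop_eq_nil_iff] using hd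
      have : PySem.List.pyRange (i : Int) (cs.length : Int) 1 = [] := by
        rw [PySem.List.pyRange_one]
        have : ((cs.length : Int) - (i : Int)).toNat = 0 := by omega
        simp [this]
      simp [this, pvALoop, pvASim]
  | cons c u' ih =>
      intro cs i e hd
      have hlt : i < cs.length := by
        by_contra hge
        rw [List.drop_eq_nil_iff.mpr (by omega)] at hd
        simp at hd
      have hget : cs[i]? = some c := by
        have h0 : cs[i]? = (cs.drop i)[0]? := by simp [List.getElem?_drop]
        rw [h0, hd]; rfl
      have hpg : PySem.List.pyGet? cs (i : Int) = some c := by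
        rw [PySem.List.pyGet?_natCast]; exact hget
      rw [PySem.List.pyRange_one_cons (by exact_mod_cast hlt)]
      by_cases hdig : PySem.Chars.isdigit c
      · have hdrop : cs.drop (i+1) = u' := by
          have h1 : List.drop 1 (List.drop i cs) = List.drop (i + 1) cs := List.drop_drop
          rw [hd] at h1
          simpa using h1.symm
        have hrec := ih cs (i+1) ((i : Nat) : Int) hdrop
        push_cast at hrec
        simp only [pvALoop, hpg, Option.getD_some, hdig, if_true, pvASim]
        exact hrec
      · simp [pvALoop, hpg, hdig, pvASim]

lemma pvASim_stop (u : List Char) (j : Nat)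
    (h : (u.takeWhile PySem.Chars.isdigit).length = 0) :
    pvASim (j+1) u ((j : Nat) : Int) = (j : Int) := by
  cases u with
  | nil => rfl
  | cons c u' =>
      have hc : PySem.Chars.isdigit c = false := by
        by_cases hc : PySem.Chars.isdigit c
        · simp [hc] at h
        · simpa using hc
      rw [pvASim]
      rw [if_neg (by simp [hc])]
      push_cast; ring

lemma pvASim_pos :
    ∀ (u : List Char) (i : Nat) (e : Int), 0 < (u.takeWhile PySem.Chars.isdigit).length →
      pvASim i u e = (i : Int) + ((u.takeWhile PySem.Chars.isdigit).length : Int) - 1 := by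
  intro u
  induction u with
  | nil => intro i e h; simp at h
  | cons c u' ih =>
      intro i e h
      have hc : PySem.Chars.isdigit c = true := by
        by_cases hc : PySem.Chars.isdigit c
        · exact hc
        · simp [hc] at h
      rw [pvASim]
      rw [List.takeWhile_cons, if_pos hc]
      simp only [hc, if_true]
      by_cases hd' : 0 < (u'.takeWhile PySem.Chars.isdigit).length
      · rw [ih (i+1) (i : Int) hd']
        push_cast [List.length_cons]; ring
      · have h0 : (u'.takeWhile PySem.Chars.isdigit).length = 0 := by omega
        rw [pvASim_stop u' i h0]
        simp [h0]

lemma take_length_takeWhile (l : List Char) (p : Char → Bool) :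
    l.take (l.takeWhile p).length = l.takeWhile p := by
  induction l with
  | nil => rfl
  | cons c t ih => by_cases h : p c <;> simp [h, ih]

-- B's fold: state is inert once the run is closed and no '/' follows
lemma foldl_closed (t : List Char) (st : Bool × List Char × Bool)
    (ht : '/' ∉ t) (hop : st.2.2 = false) : t.foldl pvBStep st = st := by
  induction t generalizing st with
  | nil => rfl
  | cons c t' ih =>
      have hc : c ≠ '/' := fun h => ht (h ▸ List.mem_cons_self)
      have hstep : pvBStep st c = st := by
        simp [pvBStep, hc, hop]
      rw [List.foldl_cons, hstep]
      exact ih _ (fun h => ht (List.mem_cons_of_mem _ h)) hop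

lemma foldl_open :
    ∀ (t : List Char) (acc : List Char), '/' ∉ t →
      t.foldl pvBStep (true, acc, true) =
        (true, acc ++ t.takeWhile PySem.Chars.isdigit,
          (t.takeWhile PySem.Chars.isdigit).length == t.length) := by
  intro t
  induction t with
  | nil => intro acc _; simp
  | cons c t' ih =>
      intro acc ht
      have hc : c ≠ '/' := fun h => ht (h ▸ List.mem_cons_self)
      have ht' : '/' ∉ t' := fun h => ht (List.mem_cons_of_mem _ h)
      rw [List.foldl_cons]
      by_cases hdig : PySem.Chars.isdigit c
      · have hstep : pvBStep (true, acc, true) c = (true, acc ++ [c], true) := by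
          simp [pvBStep, hc, hdig]
        rw [hstep, ih (acc ++ [c]) ht']
        simp [hdig]
      · have hstep : pvBStep (true, acc, true) c = (true, acc, false) := by
          simp [pvBStep, hc, hdig]
        rw [hstep, foldl_closed t' _ ht' rfl]
        simp [hdig]

lemma foldl_no_slash (t : List Char) (st : Bool × List Char × Bool) (ht : '/' ∉ t) :
    (t.foldl pvBStep st).1 = st.1 := by
  induction t generalizing st with
  | nil => rfl
  | cons c t' ih =>
      have hc : c ≠ '/' := fun h => ht (h ▸ List.mem_cons_self)
      have ht' : '/' ∉ t' := fun h => ht (List.mem_cons_of_mem _ h)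
      rw [List.foldl_cons]
      have : (pvBStep st c).1 = st.1 := by
        simp only [pvBStep, if_neg hc]
        by_cases hop : st.2.2 <;> by_cases hdig : PySem.Chars.isdigit c <;> simp [hop, hdig]
      rw [← this]
      exact ih _ ht'

-- decompose a list at its LAST '/'
lemma last_slash_decomp (cs : List Char) (h : '/' ∈ cs) :
    ∃ p t, cs = p ++ '/' :: t ∧ '/' ∉ t := by
  induction cs with
  | nil => simp at h
  | cons c cs' ih =>
      by_cases h' : '/' ∈ cs'
      · obtain ⟨p, t, hpt, ht⟩ := ih h'
        exact ⟨c :: p, t, by rw [hpt]; rfl, ht⟩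
      · have hc : c = '/' := by
          rcases List.mem_cons.mp h with h1 | h2
          · exact h1.symm
          · exact absurd h2 h'
        exact ⟨[], cs', by rw [hc]; rfl, h'⟩

theorem get_wr_id_spec : Claim_equal_get_wr_id := by
  intro url _ hpre
  unfold Spec_get_wr_id get_wr_id get_wr_id_alt
  by_cases hmem : '/' ∈ url.toList
  · obtain ⟨p, t, hcs, ht⟩ := last_slash_decomp url.toList hmem
    have hrf : PySem.Str.rfind url "/" = (p.length : Int) := by
      rw [PySem.Str.rfind_eq]
      have : ("/" : String).toList = ['/'] := rfl
      rw [this, hcs, rfind_decomp p t ht]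
    simp only [hrf, PySem.Str.len_eq]
    rw [if_neg (by omega)]
    -- A side: run the loop simulation
    have hlen1 : ("/" : String).toList.length = 1 := rfl
    have hdrop : url.toList.drop (p.length + 1) = t := by
      rw [hcs]
      have : p ++ '/' :: t = (p ++ ['/']) ++ t := by simp
      rw [this]
      have hl : p.length + 1 = (p ++ ['/']).length := by simp
      rw [hl, List.drop_left]
    have hloop :
        pvALoop url.toList (PySem.List.pyRange ((p.length : Int) + (("/" : String).toList.length : Int))
            ((url.toList.length : Int)) 1) ((p.length : Int) + (("/" : String).toList.length : Int))
          = pvASim (p.length + 1) t ((p.length + 1 : Nat) : Int) := by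
      have hcast : ((p.length : Int) + (("/" : String).toList.length : Int)) = ((p.length + 1 : Nat) : Int) := by
        rw [hlen1]; push_cast; ring
      rw [hcast]
      exact pvALoop_eq_sim t url.toList (p.length + 1) _ hdrop
    rw [hloop]
    -- B side: fold through p, the slash, then t
    have hfold : url.toList.foldl pvBStep (false, [], false) =
        (true, t.takeWhile PySem.Chars.isdigit,
          (t.takeWhile PySem.Chars.isdigit).length == t.length) := by
      rw [hcs]
      have : p ++ '/' :: t = (p ++ ['/']) ++ t := by simp
      rw [this, List.foldl_append]
      have hsl : (p ++ ['/']).foldl pvBStep (false, [], false) = (true, [], true) := by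
        rw [List.foldl_append]
        simp [pvBStep]
      rw [hsl, foldl_open t [] ht]
      simp
    rw [hfold]
    rw [if_neg (by simp)]
    -- both sides reduce to int(takeWhile isdigit t)
    set d := (t.takeWhile PySem.Chars.isdigit).length with hdd
    have hslice : PySem.Chars.slice url.toList (some ((p.length : Int) + (("/" : String).toList.length : Int)))
        (some (pvASim (p.length + 1) t ((p.length + 1 : Nat) : Int) + 1)) = t.takeWhile PySem.Chars.isdigit := by
      have hcast : ((p.length : Int) + (("/" : String).toList.length : Int)) = ((p.length + 1 : Nat) : Int) := by
        rw [hlen1]; push_cast; ring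
      rw [hcast, PySem.Chars.slice_eq_listSlice]
      by_cases hdpos : 0 < d
      · rw [pvASim_pos t (p.length + 1) _ (by omega)]
        have : ((p.length + 1 : Nat) : Int) + (d : Int) - 1 + 1 = (((p.length + 1 + d : Nat)) : Int) := by
          push_cast; ring
        rw [this, PySem.List.slice_natCast, hdrop]
        have : p.length + 1 + d - (p.length + 1) = d := by omega
        rw [this, hdd, take_length_takeWhile]
      · have hd0 : d = 0 := by omega
        cases t with
        | nil =>
            have : pvASim (p.length + 1) ([] : List Char) ((p.length + 1 : Nat) : Int) + 1
                = (((p.length + 2 : Nat)) : Int) := by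
              simp [pvASim]; ring
            rw [this, PySem.List.slice_natCast, hdrop]
            simp
        | cons c t' =>
            have hc : PySem.Chars.isdigit c = false := by
              by_cases hc : PySem.Chars.isdigit c
              · rw [hdd] at hd0; simp [hc] at hd0
              · simpa using hc
            have : pvASim (p.length + 1) (c :: t') ((p.length + 1 : Nat) : Int) + 1
                = (((p.length + 1 : Nat)) : Int) := by
              rw [pvASim]
              simp [hc]
            rw [this, PySem.List.slice_natCast]
            simp [hc]
    rw [hslice]
  · -- no slash: A returns 0 via tmp < 0, B via found = false
    have hrf : PySem.Str.rfind url "/" = -1 := by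
      rw [PySem.Str.rfind_eq]
      have : ("/" : String).toList = ['/'] := rfl
      rw [this]
      exact rfind_of_not_mem url.toList hmem
    have hfold : (url.toList.foldl pvBStep (false, [], false)).1 = false :=
      foldl_no_slash url.toList _ hmem
    rw [hrf]
    simp [hfold]
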